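-- pv_equiv track=rewrite | github.com/No-RAGrets-Research/No-RAGrets-Master | pipeline/knowledge_graph/merge_case_duplicates.py | find_case_duplicates
-- ===== SOURCE A (Python) =====
-- from collections import defaultdict
-- from typing import Dict, List, Tuple
--
-- def find_case_duplicates(nodes: List[dict]) -> Dict[str, List[dict]]:
--     """
--     Group nodes by (lowercase_name, type, namespace).
--     Returns only groups with multiple nodes (duplicates).
--     """
--     groups = defaultdict(list)
--
--     for node in nodes:
--         name = node.get('name', '')
--         node_type = node.get('type', '')
--         namespace = node.get('namespace', '')
--
--         # Create key: (lowercase_name, type, namespace)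
--         key = (name.lower(), node_type, namespace)
--         groups[key].append(node)
--
--     # Filter to only groups with duplicates
--     duplicates = {k: v for k, v in groups.items() if len(v) > 1}
--
--     return duplicates
-- ===== SOURCE B (Python) =====
-- def find_case_duplicates(nodes):
--     """Selection-style extract-and-recurse: repeatedly take the first remaining
--     node, partition the remainder by key equality, emit the group when it has
--     duplicates, and continue on the nodes with other keys."""
--     def key(n):
--         return (n.get('name', '').lower(), n.get('type', ''), n.get('namespace', ''))
--     result = []
--     rest = nodes
--     while rest:
--         head, tail = rest[0], rest[1:]
--         k = key(head)
--         same = [n for n in tail if key(n) == k]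
--         rest = [n for n in tail if key(n) != k]
--         if same:
--             result.append((k, [head] + same))
--     return dict(result)
-- ===== Notes on version B (the rewrite author's own statement) =====
-- stated objective: alternative
-- what changed: B replaces hash-bucketing into a dict of all groups with a selection-style extract-and-recurse pass: it takes the first remaining node, partitions the remaining nodes by key equality into its group and the rest, emits the group only when it has duplicates, and repeats on the rest.
import Mathlib
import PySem

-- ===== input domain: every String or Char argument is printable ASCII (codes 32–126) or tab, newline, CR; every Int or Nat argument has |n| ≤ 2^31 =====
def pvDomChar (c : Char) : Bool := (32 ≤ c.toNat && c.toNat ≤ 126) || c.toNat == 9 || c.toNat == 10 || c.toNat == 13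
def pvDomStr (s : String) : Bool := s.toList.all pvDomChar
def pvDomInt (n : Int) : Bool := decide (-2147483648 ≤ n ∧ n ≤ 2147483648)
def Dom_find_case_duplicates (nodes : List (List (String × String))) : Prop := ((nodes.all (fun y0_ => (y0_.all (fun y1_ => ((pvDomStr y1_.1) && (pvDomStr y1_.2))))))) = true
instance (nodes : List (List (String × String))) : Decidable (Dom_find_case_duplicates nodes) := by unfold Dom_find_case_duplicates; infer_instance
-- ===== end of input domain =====

-- B replaces hash-bucketing with a selection-style extract-and-recurse pass over the node list (objective: alternative, not faster).

-- ===== PORT A =====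
def find_case_duplicates (nodes : List (List (String × String))) : List (String × String × String × List (List (String × String))) :=
  let groups := nodes.foldl (fun d node =>
    let name := (PySem.Dict.mk node).getD "name" ""
    let node_type := (PySem.Dict.mk node).getD "type" ""
    let namespace_ := (PySem.Dict.mk node).getD "namespace" ""
    let key := (PySem.Str.lower name, node_type, namespace_)
    d.modify key [] (fun v => v ++ [node])) PySem.Dict.empty
  (groups.items.filter (fun p => 1 < p.2.length)).map (fun p => (p.1.1, p.1.2.1, p.1.2.2, p.2))

-- ===== PORT B =====
-- the key (name.lower(), type, namespace) of one node
def pvKey (node : List (String × String)) : String × String × String :=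
  (PySem.Str.lower ((PySem.Dict.mk node).getD "name" ""),
   (PySem.Dict.mk node).getD "type" "",
   (PySem.Dict.mk node).getD "namespace" "")

-- the while loop of Source B: rest shrinks strictly each round, result is the accumulator
def pvAltGo (acc : List ((String × String × String) × List (List (String × String))))
    (rest : List (List (String × String))) :
    List ((String × String × String) × List (List (String × String))) :=
  match rest with
  | [] => acc
  | head :: tail =>
    let k := pvKey head
    let same := tail.filter (fun n => pvKey n == k)
    let rest' := tail.filter (fun n => !(pvKey n == k))
    pvAltGo (if same.isEmpty then acc else acc ++ [(k, head :: same)]) rest'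
termination_by rest.length
decreasing_by
  simp only [List.length_cons, List.length_unattach]
  exact Nat.lt_succ_of_le (le_trans (List.length_filter_le _ _) (Nat.le_of_eq (by simp)))

def find_case_duplicates_alt (nodes : List (List (String × String))) : List (String × String × String × List (List (String × String))) :=
  (pvAltGo [] nodes).map (fun p => (p.1.1, p.1.2.1, p.1.2.2, p.2))

-- ===== PRECONDITION & SPEC =====
def Spec_find_case_duplicates (nodes : List (List (String × String))) (out : List (String × String × String × List (List (String × String)))) : Prop := out = find_case_duplicates_alt nodes
instance (nodes : List (List (String × String))) (out : List (String × String × String × List (List (String × String)))) : Decidable (Spec_find_case_duplicates nodes out) := by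
  unfold Spec_find_case_duplicates
  exact @instDecidableEqList _
    (@instDecidableEqProd _ _ instDecidableEqString
      (@instDecidableEqProd _ _ instDecidableEqString
        (@instDecidableEqProd _ _ instDecidableEqString inferInstance))) _ _

-- ===== CLAIM =====
def Claim_equal_find_case_duplicates : Prop := ∀ (nodes : List (List (String × String))), Dom_find_case_duplicates nodes → Spec_find_case_duplicates nodes (find_case_duplicates nodes)

-- ===== LEMMAS AND PROOFS =====

-- the group of nodes sharing key k
def pvGrp (nodes : List (List (String × String))) (k : String × String × String) : List (List (String × String)) :=
  nodes.filter (fun n => pvKey n == k)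

-- canonical form shared by both ports
def pvF (nodes : List (List (String × String))) :
    List ((String × String × String) × List (List (String × String))) :=
  ((PySem.Set.ofList (nodes.map pvKey)).filter
      (fun k => decide (1 < (pvGrp nodes k).length))).map
    (fun k => (k, pvGrp nodes k))

-- set(xs) commutes with filtering
theorem pvOfList_filter {α : Type} [BEq α] [LawfulBEq α] (xs : List α) (p : α → Bool) :
    PySem.Set.ofList (xs.filter p) = (PySem.Set.ofList xs).filter p := by
  induction xs using List.reverseRecOn with
  | nil => rfl
  | append_singleton xs x ih =>
    rw [PySem.Set.ofList_append_singleton, PySem.Set.add_eq_ite, List.filter_append,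
      List.filter_cons]
    by_cases hx : x ∈ xs
    · have hmem : x ∈ PySem.Set.ofList xs := (PySem.Set.mem_ofList _ _).mpr hx
      cases hp : p x with
      | true =>
        have hmf : x ∈ List.filter p xs := List.mem_filter.mpr ⟨hx, hp⟩
        simp only [reduceIte, List.filter_nil]
        rw [if_pos hmem, PySem.Set.ofList_append_singleton,
          PySem.Set.add_of_mem ((PySem.Set.mem_ofList _ _).mpr hmf), ih]
      | false =>
        simp only [Bool.false_eq_true, reduceIte, List.filter_nil]
        rw [if_pos hmem, List.append_nil, ih]
    · have hmem : x ∉ PySem.Set.ofList xs := fun h => hx ((PySem.Set.mem_ofList _ _).mp h)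
      cases hp : p x with
      | true =>
        have hmf : x ∉ List.filter p xs := fun h => hx (List.mem_filter.mp h).1
        simp only [reduceIte, List.filter_nil]
        rw [if_neg hmem, PySem.Set.ofList_append_singleton,
          PySem.Set.add_of_not_mem (fun h => hmf ((PySem.Set.mem_ofList _ _).mp h)), ih,
          List.filter_append, List.filter_cons, hp]
        simp
      | false =>
        simp only [Bool.false_eq_true, reduceIte, List.filter_nil]
        rw [if_neg hmem, List.append_nil, ih, List.filter_append,
          List.filter_cons, hp]
        simp [Bool.false_eq_true]

-- canonical form of port A
theorem pvA_canon (nodes : List (List (String × String))) :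
    find_case_duplicates nodes =
      (pvF nodes).map (fun p => (p.1.1, p.1.2.1, p.1.2.2, p.2)) := by
  unfold find_case_duplicates pvF
  rw [List.map_map]
  rw [show (nodes.foldl (fun d node =>
      let name := (PySem.Dict.mk node).getD "name" ""
      let node_type := (PySem.Dict.mk node).getD "type" ""
      let namespace_ := (PySem.Dict.mk node).getD "namespace" ""
      let key := (PySem.Str.lower name, node_type, namespace_)
      d.modify key [] (fun v => v ++ [node])) PySem.Dict.empty)
    = (nodes.map (fun n => (pvKey n, n))).foldl
        (fun d p => d.modify p.1 [] (fun v => v ++ [p.2])) PySem.Dict.empty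
    from by rw [List.foldl_map]; rfl]
  set pairs := nodes.map (fun n => (pvKey n, n)) with hpairs
  set G := pairs.foldl (fun d p => d.modify p.1 [] (fun v => v ++ [p.2])) PySem.Dict.empty with hG
  have hkeys : G.keys = PySem.Set.ofList (nodes.map pvKey) := by
    rw [hG, PySem.Dict.keys_foldl_modify_key pairs Prod.fst [] (fun _ p => fun v => v ++ [p.2])]
    simp [PySem.Set.update_nil_left, hpairs, List.map_map, Function.comp_def]
  have hnd : G.keys.Nodup := by rw [hkeys]; exact PySem.Set.nodup_ofList _
  have hget : ∀ k, G.getD k [] = pvGrp nodes k := by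
    intro k
    rw [hG, PySem.Dict.getD_foldl_modify_append, PySem.Dict.getD_empty, List.nil_append,
      hpairs, List.filter_map, List.map_map]
    simp [Function.comp_def, pvGrp]
  show (G.items.filter (fun p => decide (1 < p.2.length))).map (fun p => (p.1.1, p.1.2.1, p.1.2.2, p.2))
      = _
  rw [PySem.Dict.items_eq_map_keys G hnd [], List.filter_map, List.map_map, hkeys]
  simp only [Function.comp_def, hget]

-- dropping a node with a different key does not change a key's group
theorem pvGrp_filter_ne (tail : List (List (String × String))) (kh k : String × String × String)
    (h : ¬ kh = k) :
    pvGrp (tail.filter (fun n => !(pvKey n == kh))) k = pvGrp tail k := by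
  unfold pvGrp
  rw [List.filter_filter]
  apply List.filter_congr
  intro n _
  cases hk : (pvKey n == k) with
  | false => simp
  | true =>
    have hnk : pvKey n = k := eq_of_beq hk
    have hne : (pvKey n == kh) = false :=
      beq_eq_false_iff_ne.mpr (by rw [hnk]; exact fun he => h he.symm)
    simp [hk, hne]

-- one round of the loop in canonical form
theorem pvF_cons (head : List (String × String)) (tail : List (List (String × String))) :
    pvF (head :: tail) =
      (if (tail.filter (fun n => pvKey n == pvKey head)).isEmpty then []
       else [(pvKey head, head :: tail.filter (fun n => pvKey n == pvKey head))]) ++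
      pvF (tail.filter (fun n => !(pvKey n == pvKey head))) := by
  unfold pvF
  set kh := pvKey head with hkh
  set same := tail.filter (fun n => pvKey n == kh) with hsame
  set rest := tail.filter (fun n => !(pvKey n == kh)) with hrest
  have hgh : pvGrp (head :: tail) kh = head :: same := by
    unfold pvGrp; rw [List.filter_cons]; simp [← hkh, hsame]
  have hkeys : (head :: tail).map pvKey = kh :: tail.map pvKey := by simp [hkh]
  have hmk : rest.map pvKey = (tail.map pvKey).filter (fun y => !(y == kh)) := by
    rw [List.filter_map]; rfl
  have hrestkeys : PySem.Set.ofList (rest.map pvKey)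
      = (PySem.Set.ofList (tail.map pvKey)).filter (fun y => !(y == kh)) := by
    rw [hmk, pvOfList_filter]
  rw [hkeys, PySem.Set.ofList_cons, List.filter_cons]
  have hcond : (decide (1 < (pvGrp (head :: tail) kh).length)) = !same.isEmpty := by
    rw [hgh]; cases same <;> simp
  rw [hcond]
  have hdisc : PySem.Set.discard (PySem.Set.ofList (tail.map pvKey)) kh
      = (PySem.Set.ofList (tail.map pvKey)).filter (fun y => !(y == kh)) := rfl
  rw [hdisc, ← hrestkeys]
  have htailgrp : ∀ k ∈ PySem.Set.ofList (rest.map pvKey),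
      pvGrp (head :: tail) k = pvGrp rest k := by
    intro k hk
    have hkne : ¬ kh = k := by
      have := (PySem.Set.mem_ofList _ _).mp hk
      obtain ⟨n, hn, rfl⟩ := List.mem_map.mp this
      have := (List.mem_filter.mp (by rw [hrest] at hn; exact hn)).2
      intro he; rw [← he] at this; simp at this
    have hne : (pvKey head == k) = false := by
      rw [← hkh]; exact beq_eq_false_iff_ne.mpr hkne
    unfold pvGrp
    rw [List.filter_cons, hne]
    simp only [Bool.false_eq_true, reduceIte]
    have := pvGrp_filter_ne tail kh k hkne
    unfold pvGrp at this
    rw [hrest, this]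
  have hfc : List.filter (fun k => decide (1 < (pvGrp (head :: tail) k).length))
        (PySem.Set.ofList (rest.map pvKey))
      = List.filter (fun k => decide (1 < (pvGrp rest k).length))
        (PySem.Set.ofList (rest.map pvKey)) :=
    List.filter_congr (fun k hk => by rw [htailgrp k hk])
  have hmc : (List.filter (fun k => decide (1 < (pvGrp rest k).length))
        (PySem.Set.ofList (rest.map pvKey))).map (fun k => (k, pvGrp (head :: tail) k))
      = (List.filter (fun k => decide (1 < (pvGrp rest k).length))
        (PySem.Set.ofList (rest.map pvKey))).map (fun k => (k, pvGrp rest k)) :=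
    List.map_congr_left (fun k hk => by rw [htailgrp k (List.mem_filter.mp hk).1])
  cases h : same.isEmpty with
  | true =>
    simp only [h, Bool.not_true, Bool.false_eq_true, reduceIte, List.nil_append]
    rw [hfc, hmc]
  | false =>
    simp only [h, Bool.not_false, reduceIte]
    rw [List.map_cons, hfc, hmc, hgh]
    simp

-- the loop accumulates pvF
theorem pvAltGo_eq (fuel : Nat) :
    ∀ (rest : List (List (String × String)))
      (acc : List ((String × String × String) × List (List (String × String)))),
      rest.length ≤ fuel → pvAltGo acc rest = acc ++ pvF rest := by
  induction fuel with
  | zero =>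
    intro rest acc h
    match rest with
    | [] => simp [pvAltGo, pvF]
    | _ :: _ => simp at h
  | succ m ih =>
    intro rest acc h
    match rest with
    | [] => simp [pvAltGo, pvF]
    | head :: tail =>
      rw [pvAltGo]
      have hlen : (tail.filter (fun n => !(pvKey n == pvKey head))).length ≤ m :=
        le_trans (List.length_filter_le _ _) (Nat.le_of_succ_le_succ h)
      rw [ih _ _ hlen, pvF_cons]
      cases hs : (tail.filter (fun n => pvKey n == pvKey head)).isEmpty <;>
        simp [hs, List.append_assoc]

-- canonical form of port B
theorem pvB_canon (nodes : List (List (String × String))) :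
    find_case_duplicates_alt nodes =
      (pvF nodes).map (fun p => (p.1.1, p.1.2.1, p.1.2.2, p.2)) := by
  unfold find_case_duplicates_alt
  rw [pvAltGo_eq nodes.length nodes [] le_rfl, List.nil_append]

-- ===== VERDICT =====
theorem find_case_duplicates_spec : Claim_equal_find_case_duplicates := by
  intro nodes _
  unfold Spec_find_case_duplicates
  rw [pvA_canon, pvB_canon]
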